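-- pv_equiv track=rewrite | github.com/alicanelagoz1/equaltype | apps/backend/app/services/postprocess.py | compute_copy_policy
-- ===== SOURCE A (Python) =====
-- from typing import Any, Dict, List, Optional, Tuple
--
-- COPY_MSG_WORD_BLOCK = (
--     "This word has a long history of harm and exclusion. "
--     "For this reason, it cannot be copied or used in this context."
-- )
--
-- COPY_MSG_WORDING_BLOCK = (
--     "This wording has a long history of harm and exclusion. "
--     "For this reason, it cannot be copied or used in this context."
-- )
--
-- COPY_MSG_WORDING_WARN = (
--     "This wording may unintentionally exclude or stereotype some people. "
--     "We recommend revising or avoiding it."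
-- )
--
-- def _is_word_span(original: str) -> bool:
--     o = (original or "").strip()
--     if not o:
--         return False
--     return " " not in o and "\t" not in o and "\n" not in o
--
-- def compute_copy_policy(items: List[Dict[str, Any]]) -> Tuple[bool, Optional[str]]:
--     if not items:
--         return True, None
--
--     block_items = [it for it in items if it.get("severity") == "block"]
--     if block_items:
--         it = block_items[0]
--         original = it.get("original") or ""
--         if _is_word_span(original):
--             return False, COPY_MSG_WORD_BLOCK
--         return False, COPY_MSG_WORDING_BLOCK
--
--     if any(it.get("severity") == "warn" for it in items):
--         return True, COPY_MSG_WORDING_WARN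
--
--     return True, None
-- ===== SOURCE B (Python) =====
-- from typing import Any, Dict, List, Optional, Tuple
--
-- COPY_MSG_WORD_BLOCK = (
--     "This word has a long history of harm and exclusion. "
--     "For this reason, it cannot be copied or used in this context."
-- )
--
-- COPY_MSG_WORDING_BLOCK = (
--     "This wording has a long history of harm and exclusion. "
--     "For this reason, it cannot be copied or used in this context."
-- )
--
-- COPY_MSG_WORDING_WARN = (
--     "This wording may unintentionally exclude or stereotype some people. "
--     "We recommend revising or avoiding it."
-- )
--
-- def _is_word_span(original: str) -> bool:
--     o = (original or "").strip()
--     if not o: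
--         return False
--     return " " not in o and "\t" not in o and "\n" not in o
--
-- def compute_copy_policy(items: List[Dict[str, Any]]) -> Tuple[bool, Optional[str]]:
--     # Build the policy back-to-front: fold over the items in REVERSE order with the
--     # final (allowed, message) pair as the accumulator.  A 'block' item overwrites the
--     # accumulator outright (so the leftmost block, processed last, wins), a 'warn' item
--     # only upgrades a still-allowed accumulator; no early exit, no filtering passes.
--     policy: Tuple[bool, Optional[str]] = (True, None)
--     for it in reversed(items):
--         sev = it.get("severity")
--         if sev == "block":
--             original = it.get("original") or ""
--             if _is_word_span(original):
--                 policy = (False, COPY_MSG_WORD_BLOCK)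
--             else:
--                 policy = (False, COPY_MSG_WORDING_BLOCK)
--         elif sev == "warn" and policy[0]:
--             policy = (True, COPY_MSG_WORDING_WARN)
--     return policy
-- ===== Notes on version B (the rewrite author's own statement) =====
-- stated objective: alternative
-- what changed: Replaces A's staged logic (filter out block items, take the first, else an any() scan for warns) with a single right-to-left fold that builds the final (allowed, message) pair as an accumulator: a block item overwrites it so the leftmost block wins, a warn item only upgrades a still-allowed accumulator; no filtering, no any(), no early return.
import Mathlib
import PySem

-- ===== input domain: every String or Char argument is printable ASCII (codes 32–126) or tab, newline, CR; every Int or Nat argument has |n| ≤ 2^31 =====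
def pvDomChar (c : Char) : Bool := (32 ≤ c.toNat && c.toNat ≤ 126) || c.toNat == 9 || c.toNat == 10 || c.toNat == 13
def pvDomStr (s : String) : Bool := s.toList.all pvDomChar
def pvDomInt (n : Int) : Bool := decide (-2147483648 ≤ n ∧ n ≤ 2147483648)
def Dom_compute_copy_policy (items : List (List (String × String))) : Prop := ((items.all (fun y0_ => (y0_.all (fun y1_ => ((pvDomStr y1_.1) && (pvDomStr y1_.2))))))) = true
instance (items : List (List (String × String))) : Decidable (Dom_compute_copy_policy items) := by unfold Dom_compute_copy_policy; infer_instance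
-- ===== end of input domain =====

-- B builds the (allowed, message) pair by a fold over the items in reverse order
-- (block overwrites, warn upgrades an allowed accumulator), instead of A's
-- filter-first-block / any-warn staged logic; objective: alternative.


-- shared module constants / helper (same module context for both programs)
def COPY_MSG_WORD_BLOCK : String :=
  "This word has a long history of harm and exclusion. For this reason, it cannot be copied or used in this context."
def COPY_MSG_WORDING_BLOCK : String :=
  "This wording has a long history of harm and exclusion. For this reason, it cannot be copied or used in this context."
def COPY_MSG_WORDING_WARN : String :=
  "This wording may unintentionally exclude or stereotype some people. We recommend revising or avoiding it."

-- dict.get(key): first-match lookup on the association list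
def dget (it : List (String × String)) (k : String) : Option String :=
  match it with
  | [] => none
  | (a, b) :: t => if a == k then some b else dget t k

-- module helper _is_word_span ('original or ""' collapses with strip: strip "" = "")
def isWordSpan (original : String) : Bool :=
  let o := PySem.Str.strip original
  if o == "" then false
  else !(PySem.Str.isIn " " o) && !(PySem.Str.isIn "\t" o) && !(PySem.Str.isIn "\n" o)

-- ===== PORT A =====
def compute_copy_policy (items : List (List (String × String))) : Bool × Option String :=
  if items == [] then (true, none)
  else
    let block_items := items.filter (fun it => dget it "severity" == some "block")
    match block_items with
    | it :: _ =>
        let original := (dget it "original").getD ""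
        if isWordSpan original then (false, some COPY_MSG_WORD_BLOCK)
        else (false, some COPY_MSG_WORDING_BLOCK)
    | [] =>
        if items.any (fun it => dget it "severity" == some "warn") then
          (true, some COPY_MSG_WORDING_WARN)
        else (true, none)

-- ===== PORT B =====
-- B's loop body: one fold step over the reversed list (Python: for it in reversed(items))
def altStep (policy : Bool × Option String) (it : List (String × String)) : Bool × Option String :=
  let sev := dget it "severity"
  if sev == some "block" then
    let original := (dget it "original").getD ""
    if isWordSpan original then (false, some COPY_MSG_WORD_BLOCK)
    else (false, some COPY_MSG_WORDING_BLOCK)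
  else if sev == some "warn" && policy.1 then (true, some COPY_MSG_WORDING_WARN)
  else policy

def compute_copy_policy_alt (items : List (List (String × String))) : Bool × Option String :=
  items.reverse.foldl altStep (true, none)

-- ===== PRECONDITION & SPEC =====
def Spec_compute_copy_policy (items : List (List (String × String))) (out : Bool × Option String) : Prop := out = compute_copy_policy_alt items
instance (items : List (List (String × String))) (out : Bool × Option String) : Decidable (Spec_compute_copy_policy items out) := by unfold Spec_compute_copy_policy; infer_instance

-- ===== CLAIM (what is proved, stated in full; the proofs are below) =====
def Claim_equal_compute_copy_policy : Prop := ∀ (items : List (List (String × String))), Dom_compute_copy_policy items → Spec_compute_copy_policy items (compute_copy_policy items)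

-- ===== LEMMAS AND PROOFS =====

def blockRes (it : List (String × String)) : Bool × Option String :=
  if isWordSpan ((dget it "original").getD "") then (false, some COPY_MSG_WORD_BLOCK)
  else (false, some COPY_MSG_WORDING_BLOCK)

-- characterisation of A's result without the redundant empty-list guard
def charRes (items : List (List (String × String))) : Bool × Option String :=
  match items.filter (fun it => dget it "severity" == some "block") with
  | it :: _ => blockRes it
  | [] =>
      if items.any (fun it => dget it "severity" == some "warn") then
        (true, some COPY_MSG_WORDING_WARN)
      else (true, none)

theorem charRes_fst_false (items : List (List (String × String)))
    (h : items.filter (fun it => dget it "severity" == some "block") ≠ []) :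
    (charRes items).1 = false := by
  unfold charRes
  cases hf : items.filter (fun it => dget it "severity" == some "block") with
  | nil => exact absurd hf h
  | cons b bs => simp [blockRes]; split <;> rfl

theorem charRes_fst_true (items : List (List (String × String)))
    (h : items.filter (fun it => dget it "severity" == some "block") = []) :
    (charRes items).1 = true := by
  simp only [charRes, h]
  split <;> rfl

-- the reverse fold computes A's characterisation
theorem foldr_eq_charRes (items : List (List (String × String))) :
    items.reverse.foldl altStep (true, none) = charRes items := by
  rw [List.foldl_reverse]
  induction items with
  | nil => simp [charRes]
  | cons it rest ih =>
      simp only [List.foldr_cons, ih]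
      by_cases hb : dget it "severity" == some "block"
      · simp [altStep, hb, charRes, blockRes]
      · by_cases hw : dget it "severity" == some "warn"
        · by_cases hf : rest.filter (fun it => dget it "severity" == some "block") = []
          · have h1 := charRes_fst_true rest hf
            simp only [altStep, hw, h1, Bool.and_true]
            simp [charRes, hb, hf, List.any_cons, hw]
          · have h1 := charRes_fst_false rest hf
            simp only [altStep, hw, h1, Bool.and_false]
            rw [if_neg hb, if_neg (by simp)]
            simp only [charRes, List.filter_cons, hb]
            cases hc : rest.filter (fun it => dget it "severity" == some "block") with
            | nil => exact absurd hc hf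
            | cons b bs => rfl
        · simp only [altStep]
          rw [if_neg hb, if_neg (by simp [hw])]
          simp [charRes, hb, List.any_cons, hw]

theorem compute_copy_policy_eq_charRes (items : List (List (String × String))) :
    compute_copy_policy items = charRes items := by
  unfold compute_copy_policy charRes
  cases items with
  | nil => simp
  | cons it rest => simp [blockRes]

-- ===== VERDICT (by name: the statement is the Claim_ definition above) =====
theorem compute_copy_policy_spec : Claim_equal_compute_copy_policy := by
  intro items _
  unfold Spec_compute_copy_policy compute_copy_policy_alt
  rw [compute_copy_policy_eq_charRes, foldr_eq_charRes]
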